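-- pv_equiv track=rewrite | github.com/pypi-data/pypi-mirror-403 | packages/mssql-python/mssql_python-1.3.0-cp313-cp313-manylinux_2_28_aarch64.whl/mssql_python/connection_string_builder.py | _escape_value
-- ===== SOURCE A (Python) =====
-- def _escape_value(value: str) -> str:
--     """
--     Escape a parameter value if it contains special characters.
--
--     - Values containing ';', '{', '}', '=', or spaces should be braced for safety
--     - '}' inside braced values is escaped as '}}'
--     - '{' does not need to be escaped
--
--     Args:
--         value: Parameter value to escape
--
--     Returns:
--         Escaped value (possibly wrapped in braces)
--
--     Examples:
--         >>> builder = _ConnectionStringBuilder()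
--         >>> builder._escape_value("localhost")
--         'localhost'
--         >>> builder._escape_value("local;host")
--         '{local;host}'
--         >>> builder._escape_value("p}w{d")
--         '{p}}w{d}'
--         >>> builder._escape_value("ODBC Driver 18 for SQL Server")
--         '{ODBC Driver 18 for SQL Server}'
--     """
--     if not value:
--         return value
--
--     # Check if value contains special characters that require bracing
--     # Include spaces and = for safety, even though technically not always required
--     needs_braces = any(ch in value for ch in ";{}= ")
--
--     if needs_braces:
--         # Escape closing braces by doubling them (ODBC requirement)
--         # Opening braces do not need to be escaped
--         escaped = value.replace("}", "}}")
--         return f"{{{escaped}}}"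
--     else:
--         return value
-- ===== SOURCE B (Python) =====
-- def _escape_value(value: str) -> str:
--     # Single fused pass: build the '}'-doubled buffer and the needs-braces
--     # flag in one traversal instead of a scan plus a replace.
--     if not value:
--         return value
--     buf = []
--     needs = False
--     for ch in value:
--         buf.append(ch)
--         if ch == '}':
--             buf.append('}')
--         if ch in ';{}= ':
--             needs = True
--     if needs:
--         return '{' + ''.join(buf) + '}'
--     return value
-- ===== Notes on version B (the rewrite author's own statement) =====
-- stated objective: alternative
-- what changed: Fuses A's two passes (the any-membership scan plus str.replace) into a single character loop that builds the escaped buffer and the needs-braces flag together.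
import Mathlib
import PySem

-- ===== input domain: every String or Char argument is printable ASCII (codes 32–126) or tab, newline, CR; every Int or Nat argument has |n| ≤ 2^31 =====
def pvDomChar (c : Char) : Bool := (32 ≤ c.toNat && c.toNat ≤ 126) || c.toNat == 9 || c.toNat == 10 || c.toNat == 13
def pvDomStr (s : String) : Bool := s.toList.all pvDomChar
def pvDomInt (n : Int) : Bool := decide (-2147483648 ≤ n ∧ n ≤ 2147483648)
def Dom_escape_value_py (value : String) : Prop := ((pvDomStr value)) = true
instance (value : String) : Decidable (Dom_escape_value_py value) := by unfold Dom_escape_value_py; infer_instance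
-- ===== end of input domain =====

-- B fuses A's two passes (membership scan + str.replace) into one character loop; alternative decomposition, same cost.


-- ===== PORT A =====
def escape_value_py (value : String) : String :=
  if value = "" then value
  else
    let needs_braces := [';', '{', '}', '=', ' '].any (fun ch => PySem.Str.isIn (String.ofList [ch]) value)
    if needs_braces then
      let escaped := PySem.Str.replace value "}" "}}"
      "{" ++ escaped ++ "}"
    else value

-- ===== PORT B =====
def escape_value_py_alt (value : String) : String :=
  if value = "" then value
  else
    let st := value.toList.foldl
      (fun (acc : List Char × Bool) ch =>
        let buf := (acc.1 ++ [ch]) ++ (if ch = '}' then ['}'] else [])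
        let needs := if ch ∈ [';', '{', '}', '=', ' '] then true else acc.2
        (buf, needs)) ([], false)
    if st.2 then String.ofList ('{' :: (st.1 ++ ['}'])) else value

-- ===== PRECONDITION & SPEC =====
def Spec_escape_value_py (value : String) (out : String) : Prop := out = escape_value_py_alt value
instance (value : String) (out : String) : Decidable (Spec_escape_value_py value out) := by unfold Spec_escape_value_py; infer_instance

-- ===== CLAIM (what is proved, stated in full; the proofs are below) =====
def Claim_equal_escape_value_py : Prop := ∀ (value : String), Dom_escape_value_py value → Spec_escape_value_py value (escape_value_py value)

-- ===== LEMMAS AND PROOFS =====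

def pvEsc (c : Char) : List Char := if c = '}' then [c, '}'] else [c]

lemma foldl_state (cs : List Char) (b0 : List Char) (f0 : Bool) :
    cs.foldl
      (fun (acc : List Char × Bool) ch =>
        ((acc.1 ++ [ch]) ++ (if ch = '}' then ['}'] else []),
         if ch ∈ [';', '{', '}', '=', ' '] then true else acc.2)) (b0, f0)
    = (b0 ++ cs.flatMap pvEsc, f0 || cs.any (fun c => decide (c ∈ [';', '{', '}', '=', ' ']))) := by
  induction cs generalizing b0 f0 with
  | nil => simp
  | cons c t ih =>
    simp only [List.foldl_cons, List.flatMap_cons, List.any_cons, ih, pvEsc]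
    by_cases h : c = '}' <;> by_cases hm : c ∈ [';', '{', '}', '=', ' '] <;>
      simp [h, hm, List.append_assoc]

lemma replace_go_singleton (o : Char) (new : List Char) (l acc : List Char) (fuel : Nat)
    (h : l.length ≤ fuel) :
    PySem.Chars.replace.go [o] new fuel l acc
      = acc.reverse ++ l.flatMap (fun c => if c = o then new else [c]) := by
  induction l generalizing acc fuel with
  | nil => cases fuel <;> simp [PySem.Chars.replace.go]
  | cons c t ih =>
    cases fuel with
    | zero => simp at h
    | succ n =>
      simp only [PySem.Chars.replace.go]
      by_cases hc : c = o
      · subst hc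
        have hp : List.isPrefixOf [c] (c :: t) = true := by
          simp [List.isPrefixOf]
        simp only [hp, if_true, List.length_cons, List.length_nil, List.drop_succ_cons,
          List.drop_zero]
        rw [ih (new.reverse ++ acc) n (Nat.le_of_succ_le_succ h)]
        simp
      · have hp : List.isPrefixOf [o] (c :: t) = false := by
          simp [List.isPrefixOf]; exact fun hh => absurd hh.symm hc
        simp only [hp]
        rw [if_neg (by simp)]
        rw [ih (c :: acc) n (Nat.le_of_succ_le_succ h)]
        simp [hc]

lemma replace_singleton (cs : List Char) :
    PySem.Chars.replace cs ['}'] ['}', '}'] = cs.flatMap pvEsc := by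
  rw [PySem.Chars.replace]
  simp only [List.isEmpty_cons, if_false, Bool.false_eq_true]
  rw [replace_go_singleton '}' ['}', '}'] cs [] cs.length le_rfl]
  have hf : (fun c => if c = '}' then ['}', '}'] else [c]) = pvEsc := by
    funext c; by_cases h : c = '}' <;> simp [pvEsc, h]
  simp [hf]

lemma needs_eq (cs : List Char) :
    ([';', '{', '}', '=', ' '].any (fun ch => PySem.Chars.isIn [ch] cs))
      = cs.any (fun c => decide (c ∈ [';', '{', '}', '=', ' '])) := by
  rw [Bool.eq_iff_iff]
  simp only [List.any_eq_true]
  constructor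
  · rintro ⟨ch, hch, hin⟩
    have this := (PySem.Chars.isIn_iff_infix _ _).mp hin
    obtain ⟨p, s, hps⟩ := this
    exact ⟨ch, by rw [← hps]; simp, by simpa using hch⟩
  · rintro ⟨c, hc, hmem⟩
    refine ⟨c, by simpa using hmem, ?_⟩
    rw [PySem.Chars.isIn_iff_infix]
    obtain ⟨p, s, hps⟩ := List.mem_iff_append.mp hc
    exact ⟨p, s, by simp [hps]⟩

-- ===== VERDICT (by name: the statement is the Claim_ definition above) =====
theorem escape_value_py_spec : Claim_equal_escape_value_py := by
  intro value _
  unfold Spec_escape_value_py escape_value_py escape_value_py_alt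
  by_cases hv : value = ""
  · simp [hv]
  · simp only [hv, if_false]
    rw [foldl_state]
    simp only [List.nil_append]
    rw [← needs_eq]
    have hiin : ∀ ch, PySem.Str.isIn (String.ofList [ch]) value = PySem.Chars.isIn [ch] value.toList := by
      intro ch; simp [PySem.Str.isIn, String.toList_ofList]
    simp only [hiin]
    by_cases hn : ([';', '{', '}', '=', ' '].any (fun ch => PySem.Chars.isIn [ch] value.toList)) = true
    · simp only [hn]
      apply String.ext
      simp [PySem.Str.replace, replace_singleton, String.toList_ofList]
    · simp [hn]
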